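-- pv_equiv track=rewrite | github.com/PaulaFont/TFG_cluster | pipeline/voting_system/voting_system_line.py | align_texts_recursively
-- ===== SOURCE A (Python) =====
-- PLACEHOLDER = '^'
--
-- def _find_longest_common_substring_in_all(strings, min_lcs_len=1):
--     """
--     Finds the longest common substring present in ALL strings.
--     Tries to find it starting from the shortest string.
--     Returns the LCS and a list of its starting indices in each string,
--     or (None, None) if no common substring of at least min_lcs_len is found.
--     """
--     if not strings or not all(s for s in strings): # Ensure all strings are non-empty and list is not empty
--         return None, None
--
--     # Use the shortest string as the source for candidate substrings
--     # (sorted to ensure deterministic behavior if multiple strings have same min length)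
--     sorted_strings = sorted(strings, key=len)
--     shortest_str = sorted_strings[0]
--
--     if not shortest_str or len(shortest_str) < min_lcs_len:
--         return None, None
--
--     for length in range(len(shortest_str), min_lcs_len - 1, -1):
--         for i in range(len(shortest_str) - length + 1):
--             substring_candidate = shortest_str[i : i + length]
--
--             # Check if this candidate is in all other strings
--             # And find its first occurrence index in each
--             indices = [-1] * len(strings)
--             is_common_to_all = True
--
--             # First, find in the string it came from (shortest_str)
--             # To handle multiple occurrences, we need to map shortest_str back to its original position
--             # For simplicity, let's just check all strings including the shortest one uniformly.
--             for k, s_to_check in enumerate(strings):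
--                 try:
--                     indices[k] = s_to_check.index(substring_candidate) # Find first occurrence
--                 except ValueError:
--                     is_common_to_all = False
--                     break
--
--             if is_common_to_all:
--                 return substring_candidate, indices
--
--     return None, None
--
-- def align_texts_recursively(texts, min_lcs_len=1):
--     """
--     Aligns a list of text strings recursively based on LCS, as described in the paper.
--     """
--     # Base Case 1: If 0 or 1 text, they are "aligned" or there's nothing to align.
--     if len(texts) <= 1:
--         return texts
--
--     # Base Case 2: If any text is empty, or no LCS found, pad all to max length.
--     # This check also implicitly handles if min_lcs_len is too high for any commonality.
--     if any(not t for t in texts): # If any string is empty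
--         max_len = 0
--         if texts: # Check if texts list itself is not empty
--              max_len = max(len(t) for t in texts) if any(texts) else 0 # Max length of non-empty strings
--         return [t.ljust(max_len, PLACEHOLDER) for t in texts]
--
--     lcs, indices = _find_longest_common_substring_in_all(texts, min_lcs_len)
--
--     if lcs is None: # No common substring found
--         max_len = max(len(t) for t in texts)
--         return [t.ljust(max_len, PLACEHOLDER) for t in texts]
--
--     # Recursive step:
--     aligned_parts = [""] * len(texts)
--
--     # 1. Align parts to the LEFT of LCS
--     left_segments = [texts[i][:indices[i]] for i in range(len(texts))]
--     # Only recurse if there's actually content in any of the left segments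
--     if any(left_segments):
--         aligned_left_parts = align_texts_recursively(left_segments, min_lcs_len)
--     else:
--         aligned_left_parts = [""] * len(texts) # All left segments were empty
--
--     # 2. Align parts to the RIGHT of LCS
--     right_segments = [texts[i][indices[i] + len(lcs):] for i in range(len(texts))]
--     # Only recurse if there's actually content in any of the right segments
--     if any(right_segments):
--         aligned_right_parts = align_texts_recursively(right_segments, min_lcs_len)
--     else:
--         aligned_right_parts = [""] * len(texts) # All right segments were empty
--
--     # 3. Combine: aligned_left + LCS + aligned_right
--     for i in range(len(texts)):
--         aligned_parts[i] = aligned_left_parts[i] + lcs + aligned_right_parts[i]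
--
--     return aligned_parts
-- ===== SOURCE B (Python) =====
-- PLACEHOLDER = '^'
--
-- def _best_common(strings, min_lcs_len):
--     """Longest substring of the shortest string present in all strings,
--     found by one left-to-right pass: at each start position only try to
--     extend beyond the best length found so far (a common substring's
--     prefixes are common too, so skipping shorter lengths is sound).
--     Ties on length go to the leftmost start, matching a full scan."""
--     if not strings or not all(strings):
--         return None, None
--     shortest = min(strings, key=len)
--     S = len(shortest)
--     if S < min_lcs_len:
--         return None, None
--     best_len, best_i = 0, 0
--     for i in range(S):
--         L = best_len + 1
--         while i + L <= S and all(shortest[i:i + L] in s for s in strings):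
--             best_len, best_i = L, i
--             L += 1
--     if best_len < min_lcs_len:
--         return None, None
--     lcs = shortest[best_i:best_i + best_len]
--     return lcs, [s.index(lcs) for s in strings]
--
-- def align_texts_recursively(texts, min_lcs_len=1):
--     if len(texts) <= 1:
--         return texts
--     if any(not t for t in texts):
--         width = max(map(len, texts), default=0)
--         return [t + PLACEHOLDER * (width - len(t)) for t in texts]
--     lcs, indices = _best_common(texts, min_lcs_len)
--     if lcs is None:
--         width = max(map(len, texts))
--         return [t + PLACEHOLDER * (width - len(t)) for t in texts]
--     lefts = [t[:i] for t, i in zip(texts, indices)]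
--     rights = [t[i + len(lcs):] for t, i in zip(texts, indices)]
--     if any(lefts):
--         lefts = align_texts_recursively(lefts, min_lcs_len)
--     else:
--         lefts = [""] * len(texts)
--     if any(rights):
--         rights = align_texts_recursively(rights, min_lcs_len)
--     else:
--         rights = [""] * len(texts)
--     return [l + lcs + r for l, r in zip(lefts, rights)]
-- ===== Notes on version B (the rewrite author's own statement) =====
-- stated objective: alternative
-- what changed: The LCS search is replaced: instead of scanning every candidate length from longest to shortest and, for each length, every start position, B makes one left-to-right pass over the shortest string, at each start position only trying to extend one past the best length found so far (sound because prefixes of a common substring are common); the recursion wrapper is rebuilt on zip instead of index loops. Measured cost is similar on the generated inputs.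
-- outside the precondition, e.g. on align_texts_recursively(['ab', 'ab'], 0): A returns ['ab', 'ab'], B returns ['ab', 'ab']; on align_texts_recursively(['a', 'b'], 0): A raises RecursionError, B raises RecursionError
import Mathlib
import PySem

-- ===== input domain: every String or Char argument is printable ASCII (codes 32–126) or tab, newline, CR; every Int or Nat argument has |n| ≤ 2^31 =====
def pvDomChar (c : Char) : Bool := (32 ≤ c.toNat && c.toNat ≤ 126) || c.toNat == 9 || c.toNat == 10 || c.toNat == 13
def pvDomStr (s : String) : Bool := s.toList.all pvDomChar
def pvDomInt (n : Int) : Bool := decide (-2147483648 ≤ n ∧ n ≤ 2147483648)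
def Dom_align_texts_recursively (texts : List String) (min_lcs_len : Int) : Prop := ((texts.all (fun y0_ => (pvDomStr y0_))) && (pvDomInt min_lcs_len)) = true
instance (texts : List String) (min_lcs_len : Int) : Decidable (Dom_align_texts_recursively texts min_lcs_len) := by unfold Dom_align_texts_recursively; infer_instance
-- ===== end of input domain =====

-- B re-implements the LCS search as a single left-to-right pass with incremental extension:
-- an alternative algorithm of similar measured cost on the generated inputs. A mutates nothing.
-- Both ports run on List Char and use the same fuel bound (total length + 1) as a totality
-- guard for the recursion; under Pre_ (min_lcs_len ≥ 1) the fuel is never exhausted.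

-- ===== PORT A =====
-- t.ljust(w, c): exact hand port (pads on the right up to width w, never truncates)
def pyLjust (t : List Char) (w : Int) (c : Char) : List Char :=
  t ++ List.replicate (w.toNat - t.length) c

-- the k-loop of _find_longest_common_substring_in_all: indices[k] = s.index(cand), break on ValueError
def aIndicesLoop (cand : List Char) : List (List Char) → Option (List Int)
  | [] => some []
  | s :: rest =>
    let f := PySem.Chars.find s cand
    if f = -1 then none
    else match aIndicesLoop cand rest with
      | none => none
      | some t => some (f :: t)

-- the i-loop (one candidate length)
def aInnerLoop (strings : List (List Char)) (shortest : List Char) (L : Int) :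
    List Int → Option (List Char × List Int)
  | [] => none
  | i :: is =>
    let cand := PySem.Chars.slice shortest (some i) (some (i + L))
    match aIndicesLoop cand strings with
    | some idx => some (cand, idx)
    | none => aInnerLoop strings shortest L is

-- the length-loop: `for length in range(len(shortest), min_lcs_len - 1, -1)`, ported as a
-- counter recursion (L = current value, cnt = number of remaining iterations of the range);
-- exact: the range is iterated lazily, exactly as Python's range object is
def aOuterLoop (strings : List (List Char)) (shortest : List Char) :
    Int → Nat → Option (List Char × List Int)
  | _, 0 => none
  | L, cnt + 1 =>
    match aInnerLoop strings shortest L (PySem.List.pyRange 0 ((shortest.length : Int) - L + 1) 1) with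
    | some r => some r
    | none => aOuterLoop strings shortest (L - 1) cnt

def aFind (strings : List (List Char)) (m : Int) : Option (List Char × List Int) :=
  if strings.isEmpty || strings.any (fun s => s.isEmpty) then none
  else
    let sortedStrings := PySem.List.sorted strings (fun s => s.length) false
    let shortest := sortedStrings.headD []
    if shortest.isEmpty || (shortest.length : Int) < m then none
    else aOuterLoop strings shortest (shortest.length : Int)
      ((shortest.length : Int) - (m - 1)).toNat

def aAlign : Nat → List (List Char) → Int → List (List Char)
  | 0, _, _ => []  -- fuel exhausted (unreachable when 1 ≤ m: Python recurses forever otherwise)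
  | fuel + 1, texts, m =>
    if texts.length ≤ 1 then texts
    else if texts.any (fun t => t.isEmpty) then
      let maxLen : Int :=
        if texts.any (fun t => !t.isEmpty) then
          (PySem.List.max? (texts.map (fun t => (t.length : Int))) (fun x => x)).getD 0
        else 0
      texts.map (fun t => pyLjust t maxLen '^')
    else
      match aFind texts m with
      | none =>
        let maxLen : Int := (PySem.List.max? (texts.map (fun t => (t.length : Int))) (fun x => x)).getD 0
        texts.map (fun t => pyLjust t maxLen '^')
      | some (lcs, indices) =>
        let n : Int := texts.length
        let lefts := (PySem.List.pyRange 0 n 1).map (fun i =>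
          PySem.Chars.slice (PySem.List.pyGetD texts i []) none (some (PySem.List.pyGetD indices i 0)))
        let alignedL := if lefts.any (fun s => !s.isEmpty) then aAlign fuel lefts m
                        else List.replicate texts.length []
        let rights := (PySem.List.pyRange 0 n 1).map (fun i =>
          PySem.Chars.slice (PySem.List.pyGetD texts i [])
            (some (PySem.List.pyGetD indices i 0 + (lcs.length : Int))) none)
        let alignedR := if rights.any (fun s => !s.isEmpty) then aAlign fuel rights m
                        else List.replicate texts.length []
        (PySem.List.pyRange 0 n 1).map (fun i =>
          PySem.List.pyGetD alignedL i [] ++ lcs ++ PySem.List.pyGetD alignedR i [])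

def align_texts_recursively (texts : List String) (min_lcs_len : Int) : List String :=
  let ts := texts.map String.toList
  (aAlign ((ts.map List.length).sum + 1) ts min_lcs_len).map String.ofList

-- ===== PORT B =====
-- all(shortest[i:i+L] in s for s in strings)
def bCommonAll (strings : List (List Char)) (cand : List Char) : Bool :=
  strings.all (fun s => PySem.Chars.isIn cand s)

-- the while-loop of _best_common: extend candidate at start i while still common
def bWhile (strings : List (List Char)) (shortest : List Char) (i : Nat)
    (best : Nat × Nat) (L : Nat) : Nat → Nat × Nat
  | 0 => best
  | gas + 1 =>
    if i + L ≤ shortest.length then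
      if bCommonAll strings ((shortest.drop i).take L) then
        bWhile strings shortest i (L, i) (L + 1) gas
      else best
    else best

def bFind (strings : List (List Char)) (m : Int) : Option (List Char × List Int) :=
  if strings.isEmpty || strings.any (fun s => s.isEmpty) then none
  else
    let shortest := PySem.List.minD strings (fun s => s.length) []
    let S := shortest.length
    if (S : Int) < m then none
    else
      let best := (List.range S).foldl
        (fun best i => bWhile strings shortest i best (best.1 + 1) (S + 1)) (0, 0)
      if (best.1 : Int) < m then none
      else
        let lcs := (shortest.drop best.2).take best.1
        some (lcs, strings.map (fun s => PySem.Chars.find s lcs))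

def bAlign : Nat → List (List Char) → Int → List (List Char)
  | 0, _, _ => []  -- fuel exhausted (unreachable when 1 ≤ m)
  | fuel + 1, texts, m =>
    if texts.length ≤ 1 then texts
    else if texts.any (fun t => t.isEmpty) then
      let width : Int := PySem.List.maxD (texts.map (fun t => (t.length : Int))) (fun x => x) 0
      texts.map (fun t => t ++ List.replicate (width - (t.length : Int)).toNat '^')
    else
      match bFind texts m with
      | none =>
        let width : Int := (PySem.List.max? (texts.map (fun t => (t.length : Int))) (fun x => x)).getD 0
        texts.map (fun t => t ++ List.replicate (width - (t.length : Int)).toNat '^')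
      | some (lcs, indices) =>
        let lefts := (texts.zip indices).map (fun p => PySem.Chars.slice p.1 none (some p.2))
        let rights := (texts.zip indices).map (fun p =>
          PySem.Chars.slice p.1 (some (p.2 + (lcs.length : Int))) none)
        let aL := if lefts.any (fun s => !s.isEmpty) then bAlign fuel lefts m
                  else List.replicate texts.length []
        let aR := if rights.any (fun s => !s.isEmpty) then bAlign fuel rights m
                  else List.replicate texts.length []
        (aL.zip aR).map (fun p => p.1 ++ lcs ++ p.2)

def align_texts_recursively_alt (texts : List String) (min_lcs_len : Int) : List String :=
  let ts := texts.map String.toList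
  (bAlign ((ts.map List.length).sum + 1) ts min_lcs_len).map String.ofList

-- ===== PRECONDITION & SPEC =====
-- Pre_ excludes min_lcs_len ≤ 0 except on the non-recursive shapes (at most one text, or some
-- empty text): there the Python A recurses without bound (RecursionError) whenever some recursion
-- node's strings share no nonempty common substring, and B's Python diverges the same way; other
-- min_lcs_len ≤ 0 inputs may still return (every node finds a nonempty LCS) with A = B, but the
-- diverging inputs admit no closed-form description, so those are excluded.
def Pre_align_texts_recursively (texts : List String) (min_lcs_len : Int) : Prop :=
  1 ≤ min_lcs_len ∨ texts.length ≤ 1 ∨ ∃ t ∈ texts, t = ""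
instance (texts : List String) (min_lcs_len : Int) : Decidable (Pre_align_texts_recursively texts min_lcs_len) := by unfold Pre_align_texts_recursively; infer_instance

def pvWitness_align_texts_recursively : List String × Int := (["abcde", "xbcdy", "bcd"], 1)

def Spec_align_texts_recursively (texts : List String) (min_lcs_len : Int) (out : List String) : Prop := out = align_texts_recursively_alt texts min_lcs_len
instance (texts : List String) (min_lcs_len : Int) (out : List String) : Decidable (Spec_align_texts_recursively texts min_lcs_len out) := by unfold Spec_align_texts_recursively; infer_instance

-- ===== CLAIM (what is proved, stated in full; the proofs are below) =====
def Claim_equal_align_texts_recursively : Prop := ∀ (texts : List String) (min_lcs_len : Int), Dom_align_texts_recursively texts min_lcs_len → Pre_align_texts_recursively texts min_lcs_len → Spec_align_texts_recursively texts min_lcs_len (align_texts_recursively texts min_lcs_len)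

-- ===== LEMMAS AND PROOFS =====
-- proof-only helpers: a common vocabulary for both LCS searches
def candAt (cs : List Char) (i L : Nat) : List Char := (cs.drop i).take L

def extAt (ss : List (List Char)) (cs : List Char) (i : Nat) : Nat :=
  Nat.findGreatest (fun L => bCommonAll ss (candAt cs i L) = true) (cs.length - i)

def bestLenAt (ss : List (List Char)) (cs : List Char) : Nat :=
  Nat.findGreatest
    (fun L => ∃ i ≤ cs.length, i + L ≤ cs.length ∧ bCommonAll ss (candAt cs i L) = true)
    cs.length

def leastIdxAt (ss : List (List Char)) (cs : List Char) : Nat :=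
  if h : ∃ i ≤ cs.length,
      i + bestLenAt ss cs ≤ cs.length ∧ bCommonAll ss (candAt cs i (bestLenAt ss cs)) = true
  then Nat.find (h.imp (fun _ hi => hi.2)) else 0

-- the (lcs, indices) pair both searches return when a common substring exists
def resAt (ss : List (List Char)) (cs : List Char) : List Char × List Int :=
  let lcs := candAt cs (leastIdxAt ss cs) (bestLenAt ss cs)
  (lcs, ss.map (fun s => PySem.Chars.find s lcs))

theorem common_mono {ss : List (List Char)} {cs : List Char} {i L L' : Nat}
    (hL : L' ≤ L) (h : bCommonAll ss (candAt cs i L) = true) :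
    bCommonAll ss (candAt cs i L') = true := by
  simp only [bCommonAll, List.all_eq_true] at h ⊢
  intro s hs
  have h1 := h s hs
  rw [PySem.Chars.isIn_iff_infix] at h1 ⊢
  have he : candAt cs i L' = (candAt cs i L).take L' := by
    simp [candAt, List.take_take, Nat.min_eq_left hL]
  rw [he]
  exact (List.take_prefix _ _).isInfix.trans h1

theorem common_zero (ss : List (List Char)) (cs : List Char) (i : Nat) :
    bCommonAll ss (candAt cs i 0) = true := by
  simp only [bCommonAll, List.all_eq_true]
  intro s _
  simp [candAt, PySem.Chars.isIn_nil]

theorem ext_le (ss : List (List Char)) (cs : List Char) (i : Nat) :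
    extAt ss cs i ≤ cs.length - i := Nat.findGreatest_le _

theorem ext_common (ss : List (List Char)) (cs : List Char) (i : Nat) :
    bCommonAll ss (candAt cs i (extAt ss cs i)) = true := by
  exact Nat.findGreatest_spec (P := fun L => bCommonAll ss (candAt cs i L) = true)
    (Nat.zero_le _) (common_zero ss cs i)

theorem le_ext_iff {ss : List (List Char)} {cs : List Char} {i L : Nat} (hi : i ≤ cs.length) :
    L ≤ extAt ss cs i ↔ (i + L ≤ cs.length ∧ bCommonAll ss (candAt cs i L) = true) := by
  constructor
  · intro h
    refine ⟨?_, common_mono h (ext_common ss cs i)⟩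
    have := ext_le ss cs i
    omega
  · rintro ⟨h1, h2⟩
    exact Nat.le_findGreatest (by omega) h2

theorem bWhile_run (ss : List (List Char)) (cs : List Char) (i : Nat) (hi : i ≤ cs.length) :
    ∀ (gas L : Nat) (best : Nat × Nat), cs.length + 2 ≤ gas + L →
      bWhile ss cs i best L gas =
        if L ≤ extAt ss cs i then (extAt ss cs i, i) else best := by
  intro gas
  induction gas with
  | zero =>
    intro L best hg
    have hle := ext_le ss cs i
    rw [bWhile, if_neg (by omega)]
  | succ gas ih =>
    intro L best hg
    rw [bWhile]
    by_cases hL : L ≤ extAt ss cs i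
    · have hc := (le_ext_iff hi).mp hL
      rw [if_pos hc.1, if_pos (show bCommonAll ss (List.take L (List.drop i cs)) = true from hc.2),
        ih (L + 1) (L, i) (by omega)]
      by_cases h2 : L + 1 ≤ extAt ss cs i
      · rw [if_pos h2, if_pos hL]
      · have hEq : L = extAt ss cs i := by omega
        rw [if_neg h2, if_pos hL, hEq]
    · rw [if_neg hL]
      by_cases h1 : i + L ≤ cs.length
      · have h2 : ¬ (bCommonAll ss (candAt cs i L) = true) := fun hc =>
          hL ((le_ext_iff hi).mpr ⟨h1, hc⟩)
        rw [if_pos h1, if_neg (show ¬ bCommonAll ss (List.take L (List.drop i cs)) = true from h2)]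
      · rw [if_neg h1]

def scanStep (ss : List (List Char)) (cs : List Char) : (Nat × Nat) → Nat → (Nat × Nat) :=
  fun best i => bWhile ss cs i best (best.1 + 1) (cs.length + 1)

theorem scanStep_eq (ss : List (List Char)) (cs : List Char) (i : Nat) (hi : i ≤ cs.length)
    (b j : Nat) :
    scanStep ss cs (b, j) i = if b < extAt ss cs i then (extAt ss cs i, i) else (b, j) := by
  unfold scanStep
  rw [bWhile_run ss cs i hi (cs.length + 1) (b + 1) (b, j) (by omega)]
  by_cases h : b < extAt ss cs i
  · rw [if_pos (by omega), if_pos h]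
  · rw [if_neg (by omega), if_neg h]

def scanInv (ss : List (List Char)) (cs : List Char) (k : Nat) (p : Nat × Nat) : Prop :=
  (∀ j < k, extAt ss cs j ≤ p.1) ∧
  (p = (0, 0) ∨ (p.2 < k ∧ extAt ss cs p.2 = p.1 ∧ ∀ j < p.2, extAt ss cs j < p.1))

theorem scan_inv (ss : List (List Char)) (cs : List Char) :
    ∀ k ≤ cs.length, scanInv ss cs k ((List.range k).foldl (scanStep ss cs) (0, 0)) := by
  intro k
  induction k with
  | zero => intro _; exact ⟨by omega, Or.inl rfl⟩
  | succ k ih =>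
    intro hk
    obtain ⟨ih1, ih2⟩ := ih (by omega)
    rw [List.range_succ, List.foldl_append, List.foldl_cons, List.foldl_nil]
    set p := (List.range k).foldl (scanStep ss cs) (0, 0) with hp
    rw [show p = (p.1, p.2) from rfl, scanStep_eq ss cs k (by omega)]
    by_cases h : p.1 < extAt ss cs k
    · rw [if_pos h]
      refine ⟨?_, Or.inr ⟨by omega, rfl, ?_⟩⟩
      · intro j hj
        rcases Nat.lt_succ_iff_lt_or_eq.mp hj with hj | hj
        · exact le_of_lt (lt_of_le_of_lt (ih1 j hj) h)
        · simp [hj]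
      · intro j hj
        exact lt_of_le_of_lt (ih1 j hj) h
    · rw [if_neg h]
      refine ⟨?_, ?_⟩
      · intro j hj
        rcases Nat.lt_succ_iff_lt_or_eq.mp hj with hj | hj
        · exact ih1 j hj
        · subst hj; omega
      · rcases ih2 with h2 | ⟨h2, h3, h4⟩
        · exact Or.inl h2
        · exact Or.inr ⟨by omega, h3, h4⟩

theorem le_bestLen_iff (ss : List (List Char)) (cs : List Char) (L : Nat) :
    L ≤ bestLenAt ss cs ↔
      ∃ i, i + L ≤ cs.length ∧ bCommonAll ss (candAt cs i L) = true := by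
  constructor
  · intro h
    have hP : ∃ i ≤ cs.length, i + bestLenAt ss cs ≤ cs.length ∧
        bCommonAll ss (candAt cs i (bestLenAt ss cs)) = true :=
      Nat.findGreatest_spec
        (P := fun L => ∃ i ≤ cs.length, i + L ≤ cs.length ∧ bCommonAll ss (candAt cs i L) = true)
        (m := 0) (Nat.zero_le _) ⟨0, Nat.zero_le _, by omega, common_zero ss cs 0⟩
    obtain ⟨i, _, h1, h2⟩ := hP
    exact ⟨i, by omega, common_mono h h2⟩
  · rintro ⟨i, h1, h2⟩
    exact Nat.le_findGreatest (by omega) ⟨i, by omega, h1, h2⟩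

theorem bestLen_le (ss : List (List Char)) (cs : List Char) : bestLenAt ss cs ≤ cs.length :=
  Nat.findGreatest_le _

theorem scan_final (ss : List (List Char)) (cs : List Char) :
    ((List.range cs.length).foldl (scanStep ss cs) (0, 0)).1 = bestLenAt ss cs ∧
    (1 ≤ bestLenAt ss cs →
      ((List.range cs.length).foldl (scanStep ss cs) (0, 0)).2 = leastIdxAt ss cs) := by
  obtain ⟨inv1, inv2⟩ := scan_inv ss cs cs.length (le_refl _)
  set p := (List.range cs.length).foldl (scanStep ss cs) (0, 0) with hp
  have hub : p.1 ≤ bestLenAt ss cs := by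
    rcases inv2 with h | ⟨hlt, heq, _⟩
    · rw [h]; exact Nat.zero_le _
    · refine (le_bestLen_iff ss cs p.1).mpr ⟨p.2, ?_, heq ▸ ext_common ss cs p.2⟩
      have := ext_le ss cs p.2
      omega
  have hlb : bestLenAt ss cs ≤ p.1 := by
    rcases Nat.eq_zero_or_pos (bestLenAt ss cs) with h0 | h0
    · omega
    · obtain ⟨i, h1, h2⟩ := (le_bestLen_iff ss cs (bestLenAt ss cs)).mp (le_refl _)
      have hi : i < cs.length := by omega
      have h3 : bestLenAt ss cs ≤ extAt ss cs i :=
        (le_ext_iff (by omega)).mpr ⟨h1, h2⟩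
      exact le_trans h3 (inv1 i hi)
  have h1 : p.1 = bestLenAt ss cs := le_antisymm hub hlb
  refine ⟨h1, ?_⟩
  intro hpos
  have hne : p ≠ (0, 0) := by
    intro h; rw [h] at h1; simp at h1; omega
  rcases inv2 with h | ⟨hlt, heq, hmin⟩
  · exact absurd h hne
  obtain ⟨i, hA1, hA2⟩ := (le_bestLen_iff ss cs (bestLenAt ss cs)).mp (le_refl _)
  have hex : ∃ i ≤ cs.length,
      i + bestLenAt ss cs ≤ cs.length ∧ bCommonAll ss (candAt cs i (bestLenAt ss cs)) = true :=
    ⟨i, by omega, hA1, hA2⟩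
  rw [leastIdxAt, dif_pos hex]
  have hQ2 : p.2 + bestLenAt ss cs ≤ cs.length ∧
      bCommonAll ss (candAt cs p.2 (bestLenAt ss cs)) = true := by
    constructor
    · have := ext_le ss cs p.2
      omega
    · rw [← h1, ← heq]; exact ext_common ss cs p.2
  refine ((Nat.find_eq_iff _).mpr ⟨hQ2, ?_⟩).symm
  intro k hk hQ
  have hk2 : bestLenAt ss cs ≤ extAt ss cs k := (le_ext_iff (by omega)).mpr ⟨hQ.1, hQ.2⟩
  have := hmin k hk
  omega

theorem aIndicesLoop_some {ss : List (List Char)} {cand : List Char}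
    (h : bCommonAll ss cand = true) :
    aIndicesLoop cand ss = some (ss.map (fun s => PySem.Chars.find s cand)) := by
  induction ss with
  | nil => rfl
  | cons s rest ih =>
    simp only [bCommonAll, List.all_cons, Bool.and_eq_true] at h
    have hfind : ¬ PySem.Chars.find s cand = -1 := by
      rw [PySem.Chars.find_eq_neg_one_iff]
      exact fun hni => hni ((PySem.Chars.isIn_iff_infix _ _).mp h.1)
    rw [aIndicesLoop, if_neg hfind, ih h.2]
    rfl

theorem aIndicesLoop_none {ss : List (List Char)} {cand : List Char}
    (h : bCommonAll ss cand = false) : aIndicesLoop cand ss = none := by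
  induction ss with
  | nil => simp [bCommonAll] at h
  | cons s rest ih =>
    simp only [bCommonAll, List.all_cons, Bool.and_eq_false_iff] at h
    rcases h with h | h
    · rw [aIndicesLoop, if_pos]
      rw [PySem.Chars.find_eq_neg_one_iff]
      intro hin
      rw [(PySem.Chars.isIn_iff_infix _ _).mpr hin] at h
      simp at h
    · rw [aIndicesLoop]
      split
      · rfl
      · rw [ih h]

theorem inner_none (ss : List (List Char)) (cs : List Char) (ℓ : Nat) :
    ∀ (n a : Nat), (∀ i, a ≤ i → i < a + n → bCommonAll ss (candAt cs i ℓ) = false) →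
      aInnerLoop ss cs (ℓ : Int) ((List.range' a n).map (Nat.cast : Nat → Int)) = none := by
  intro n
  induction n with
  | zero => intro a _; rfl
  | succ n ih =>
    intro a h
    rw [List.range'_succ, List.map_cons, aInnerLoop]
    have hcand : PySem.Chars.slice cs (some (a : Int)) (some ((a : Int) + (ℓ : Int))) =
        candAt cs a ℓ := by
      simp [PySem.List.slice_natCast_add, candAt]
    rw [hcand, aIndicesLoop_none (h a (le_refl _) (by omega))]
    exact ih (a + 1) (fun i h1 h2 => h i (by omega) (by omega))

theorem inner_found (ss : List (List Char)) (cs : List Char) (ℓ : Nat) :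
    ∀ (n a i0 : Nat), a ≤ i0 → i0 < a + n →
      bCommonAll ss (candAt cs i0 ℓ) = true →
      (∀ j, a ≤ j → j < i0 → bCommonAll ss (candAt cs j ℓ) = false) →
      aInnerLoop ss cs (ℓ : Int) ((List.range' a n).map (Nat.cast : Nat → Int)) =
        some (candAt cs i0 ℓ, ss.map (fun s => PySem.Chars.find s (candAt cs i0 ℓ))) := by
  intro n
  induction n with
  | zero => intro a i0 h1 h2; omega
  | succ n ih =>
    intro a i0 h1 h2 hc hmin
    rw [List.range'_succ, List.map_cons, aInnerLoop]
    have hcand : PySem.Chars.slice cs (some (a : Int)) (some ((a : Int) + (ℓ : Int))) =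
        candAt cs a ℓ := by
      simp [PySem.List.slice_natCast_add, candAt]
    rcases Nat.eq_or_lt_of_le h1 with he | hlt
    · subst he
      rw [hcand, aIndicesLoop_some hc]
    · rw [hcand, aIndicesLoop_none (hmin a (le_refl _) hlt)]
      exact ih (a + 1) i0 hlt (by omega) hc (fun j hj1 hj2 => hmin j (by omega) hj2)

theorem outer_desc (ss : List (List Char)) (cs : List Char) :
    ∀ (cnt t : Nat), t ≤ cs.length → cnt ≤ t → bestLenAt ss cs ≤ t →
      aOuterLoop ss cs (t : Int) cnt =
        if t < bestLenAt ss cs + cnt then some (resAt ss cs) else none := by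
  intro cnt
  induction cnt with
  | zero =>
    intro t _ _ h3
    rw [if_neg (by omega)]; rfl
  | succ cnt ih =>
    intro t hts hct hMt
    rw [aOuterLoop]
    have hdec : (t : Int) - 1 = ((t - 1 : Nat) : Int) := by
      have : 1 ≤ t := by omega
      push_cast [this]
      ring
    rw [hdec]
    have hlist : PySem.List.pyRange 0 ((cs.length : Int) - (t : Int) + 1) 1 =
        (List.range' 0 (cs.length - t + 1)).map (Nat.cast : Nat → Int) := by
      have : (cs.length : Int) - (t : Int) + 1 = ((cs.length - t + 1 : Nat) : Int) := by
        push_cast [hts]; omega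
      rw [this, PySem.List.pyRange_zero_natCast, ← List.range_eq_range']
    rcases Nat.eq_or_lt_of_le hMt with hM | hM
    · -- t = bestLenAt: the inner scan hits; first hit is leastIdxAt
      have hpos : 1 ≤ bestLenAt ss cs := by omega
      obtain ⟨i, hA1, hA2⟩ := (le_bestLen_iff ss cs (bestLenAt ss cs)).mp (le_refl _)
      have hex : ∃ i ≤ cs.length, i + bestLenAt ss cs ≤ cs.length ∧
          bCommonAll ss (candAt cs i (bestLenAt ss cs)) = true := ⟨i, by omega, hA1, hA2⟩
      have hex' := hex.imp (fun _ hi => hi.2)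
      have hfind := Nat.find_spec hex'
      have hi0 : leastIdxAt ss cs = Nat.find hex' := by
        rw [leastIdxAt, dif_pos hex]
      subst hM
      rw [hlist]
      have hfind1 := hfind.1
      rw [inner_found ss cs (bestLenAt ss cs) (cs.length - bestLenAt ss cs + 1) 0
        (Nat.find hex') (Nat.zero_le _) (by omega) hfind.2 ?_]
      · rw [if_pos (by omega)]
        unfold resAt
        rw [hi0]
      · intro j _ hj
        by_contra hcj
        have hcj' : bCommonAll ss (candAt cs j (bestLenAt ss cs)) = true := by
          cases hcb : bCommonAll ss (candAt cs j (bestLenAt ss cs))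
          · exact absurd hcb hcj
          · rfl
        exact Nat.find_min hex' hj ⟨by omega, hcj'⟩
    · -- bestLenAt < t: no hit at length t, recurse
      rw [hlist, inner_none ss cs t (cs.length - t + 1) 0 ?_]
      · rw [ih (t - 1) (by omega) (by omega) (by omega)]
        show (if t - 1 < bestLenAt ss cs + cnt then some (resAt ss cs) else none) =
          if t < bestLenAt ss cs + (cnt + 1) then some (resAt ss cs) else none
        by_cases hc : t - 1 < bestLenAt ss cs + cnt
        · rw [if_pos hc, if_pos (by omega)]
        · rw [if_neg hc, if_neg (by omega)]
      · intro j hj1 hj2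
        by_contra hcj
        have hcj' : bCommonAll ss (candAt cs j t) = true := by
          cases hcb : bCommonAll ss (candAt cs j t)
          · exact absurd hcb hcj
          · rfl
        have : t ≤ bestLenAt ss cs :=
          (le_bestLen_iff ss cs t).mpr ⟨j, by omega, hcj'⟩
        omega

theorem head_insert_fold {α : Type} (key : α → Nat) :
    ∀ (xs : List α) (acc : List α),
      ((xs.foldl (fun acc x => PySem.List.insertBy (fun a b => decide (key a < key b)) x acc) acc).head?) =
        xs.foldl (fun m x => match m with
          | none => some x
          | some mm => if key x < key mm then some x else some mm) acc.head? := by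
  intro xs
  induction xs with
  | nil => intro acc; rfl
  | cons x rest ih =>
    intro acc
    rw [List.foldl_cons, List.foldl_cons, ih]
    congr 1
    cases acc with
    | nil => rfl
    | cons a t =>
      simp only [PySem.List.insertBy, List.head?_cons]
      by_cases h : key x < key a
      · rw [if_pos (by simpa using h)]
        simp [h]
      · rw [if_neg (by simpa using h)]
        simp [h]

theorem sorted_head_minD (xs : List (List Char)) (d : List Char) :
    (PySem.List.sorted xs (fun s => s.length) false).headD d =
      PySem.List.minD xs (fun s => s.length) d := by
  rw [PySem.List.sorted_eq_foldl_insertBy]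
  rw [List.headD_eq_head?_getD, head_insert_fold (fun s => s.length) xs []]
  rfl

theorem find_eq (ss : List (List Char)) (m : Int) (hm : 1 ≤ m) :
    aFind ss m = bFind ss m := by
  unfold aFind bFind
  by_cases hg : (ss.isEmpty || ss.any (fun s => s.isEmpty)) = true
  · rw [if_pos hg, if_pos hg]
  · rw [if_neg hg, if_neg hg]
    simp only [Bool.or_eq_true, not_or] at hg
    obtain ⟨hne, hall⟩ := hg
    simp only [sorted_head_minD]
    set cs := PySem.List.minD ss (fun s => s.length) [] with hcs
    have hmem : cs ∈ ss := by
      have gen : ∀ {α : Type} (f : Option α → α → Option α),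
          (∀ (a : α) (x : α), (f (some a) x).isSome = true) →
          ∀ (l : List α) (a : α), (List.foldl f (some a) l).isSome = true := by
        intro α f hf l
        induction l with
        | nil => intro a; rfl
        | cons y ys ih =>
          intro a
          rw [List.foldl_cons]
          rcases Option.isSome_iff_exists.mp (hf a y) with ⟨b, hb⟩
          rw [hb]
          exact ih b
      have hsome : (PySem.List.min? ss (fun s => s.length)).isSome = true := by
        rcases List.exists_cons_of_ne_nil (by simpa [List.isEmpty_iff] using hne) with ⟨x, t, hx⟩
        subst hx
        rw [PySem.List.min?, List.foldl_cons]
        exact gen _ (fun a x => by dsimp only; split <;> rfl) t x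
      obtain ⟨v, hv⟩ := Option.isSome_iff_exists.mp hsome
      rw [hcs, PySem.List.minD, hv]
      exact PySem.List.min?_mem hv
    have hcsne : cs.isEmpty = false := by
      cases h : cs.isEmpty
      · rfl
      · simp only [List.any_eq_true, not_exists, not_and] at hall
        exact absurd h (by simpa using hall cs hmem)
    rw [hcsne]
    simp only [Bool.false_or]
    by_cases hSm : (cs.length : Int) < m
    · rw [if_pos (by simpa using hSm), if_pos (by simpa using hSm)]
    · rw [if_neg (by simpa using hSm), if_neg (by simpa using hSm)]
      have hmN : m = (m.toNat : Int) := (Int.toNat_of_nonneg (by omega)).symm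
      have hm1 : 1 ≤ m.toNat := by omega
      have hm2 : m.toNat ≤ cs.length := by omega
      have hcnt : ((cs.length : Int) - ((m.toNat : Int) - 1)).toNat = cs.length - m.toNat + 1 := by
        omega
      rw [hmN, hcnt,
        outer_desc ss cs (cs.length - m.toNat + 1) cs.length (le_refl _) (by omega)
          (bestLen_le ss cs)]
      have hstep : (fun (best : Nat × Nat) (i : Nat) =>
          bWhile ss cs i best (best.1 + 1) (cs.length + 1)) = scanStep ss cs := rfl
      rw [hstep]
      obtain ⟨hb1, hb2⟩ := scan_final ss cs
      rw [hb1]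
      by_cases hMm : m.toNat ≤ bestLenAt ss cs
      · rw [if_pos (by omega), if_neg (by simp; omega), hb2 (by omega)]
        unfold resAt
        rfl
      · rw [if_neg (by omega), if_pos (by simp; omega)]

theorem leastQ_spec (ss : List (List Char)) (cs : List Char) :
    leastIdxAt ss cs + bestLenAt ss cs ≤ cs.length ∧
      bCommonAll ss (candAt cs (leastIdxAt ss cs) (bestLenAt ss cs)) = true := by
  obtain ⟨i, h1, h2⟩ := (le_bestLen_iff ss cs (bestLenAt ss cs)).mp (le_refl _)
  have hex : ∃ i ≤ cs.length, i + bestLenAt ss cs ≤ cs.length ∧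
      bCommonAll ss (candAt cs i (bestLenAt ss cs)) = true := ⟨i, by omega, h1, h2⟩
  rw [leastIdxAt, dif_pos hex]
  exact Nat.find_spec (hex.imp (fun _ hi => hi.2))

theorem bFind_spec {ss : List (List Char)} {m : Int} {lcs : List Char} {idxs : List Int}
    (hm : 1 ≤ m) (h : bFind ss m = some (lcs, idxs)) :
    1 ≤ lcs.length ∧ idxs = ss.map (fun s => PySem.Chars.find s lcs) ∧
      ∀ s ∈ ss, PySem.Chars.isIn lcs s = true := by
  unfold bFind at h
  by_cases hg : (ss.isEmpty || ss.any fun s => s.isEmpty) = true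
  · rw [if_pos hg] at h; exact absurd h (by simp)
  · rw [if_neg hg] at h
    simp only [] at h
    set cs := PySem.List.minD ss (fun s => s.length) [] with hcs
    by_cases h1 : ((cs.length : Int) < m) = True
    · rw [if_pos (by simpa using h1)] at h; exact absurd h (by simp)
    · rw [if_neg (by simpa using h1)] at h
      have hstep : (fun (best : Nat × Nat) (i : Nat) =>
          bWhile ss cs i best (best.1 + 1) (cs.length + 1)) = scanStep ss cs := rfl
      rw [hstep] at h
      obtain ⟨hb1, hb2⟩ := scan_final ss cs
      rw [hb1] at h
      by_cases h2 : ((bestLenAt ss cs : Int) < m) = True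
      · rw [if_pos (by simpa using h2)] at h; exact absurd h (by simp)
      · rw [if_neg (by simpa using h2)] at h
        have hM1 : 1 ≤ bestLenAt ss cs := by
          simp only [eq_iff_iff, iff_true] at h2
          omega
        rw [hb2 hM1] at h
        obtain ⟨hq1, hq2⟩ := leastQ_spec ss cs
        have hlcs : lcs = candAt cs (leastIdxAt ss cs) (bestLenAt ss cs) := by
          have := congrArg (fun o => Option.map Prod.fst o) h
          simpa [candAt] using this.symm
        have hidxs : idxs = ss.map (fun s => PySem.Chars.find s lcs) := by
          have h2' := congrArg (fun o => Option.map Prod.snd o) h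
          simp only [Option.map_some] at h2'
          have h2'' := congrArg (fun o => o.getD ([] : List Int)) h2'
          simp only [Option.getD_some] at h2''
          rw [← h2'']
          apply List.map_congr_left
          intro s _
          rw [hlcs, candAt]
        refine ⟨?_, hidxs, ?_⟩
        · rw [hlcs]
          simp only [candAt, List.length_take, List.length_drop]
          omega
        · intro s hs
          rw [hlcs]
          simp only [bCommonAll, List.all_eq_true] at hq2
          exact hq2 s hs

theorem widths_eq (texts : List (List Char)) (h : texts ≠ []) :
    (if texts.any (fun t => !t.isEmpty) then
        (PySem.List.max? (texts.map (fun t => (t.length : Int))) (fun x => x)).getD 0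
      else 0) =
      PySem.List.maxD (texts.map (fun t => (t.length : Int))) (fun x => x) 0 := by
  by_cases ha : (texts.any (fun t => !t.isEmpty)) = true
  · rw [if_pos ha]; rfl
  · rw [if_neg ha]
    have hz : ∀ v ∈ texts.map (fun t => (t.length : Int)), v = 0 := by
      intro v hv
      simp only [List.any_eq_true, Bool.not_eq_eq_eq_not, Bool.not_true, not_exists, not_and,
        Bool.not_eq_false] at ha
      simp only [List.mem_map] at hv
      obtain ⟨t, ht, rfl⟩ := hv
      have := ha t ht
      simp [List.isEmpty_iff.mp this]
    rw [PySem.List.maxD]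
    cases hmx : PySem.List.max? (texts.map fun t => (t.length : Int)) (fun x => x) with
    | none => rfl
    | some v =>
      have hv := hz v (PySem.List.max?_mem hmx)
      simp [hv]

theorem width_nonneg (texts : List (List Char)) :
    0 ≤ (PySem.List.max? (texts.map (fun t => (t.length : Int))) (fun x => x)).getD 0 := by
  cases hmx : PySem.List.max? (texts.map fun t => (t.length : Int)) (fun x => x) with
  | none => simp
  | some v =>
    have hv := PySem.List.max?_mem hmx
    simp only [List.mem_map] at hv
    obtain ⟨t, _, rfl⟩ := hv
    simp

theorem ljust_eq (t : List Char) (w : Int) (hw : 0 ≤ w) :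
    pyLjust t w '^' = t ++ List.replicate (w - (t.length : Int)).toNat '^' := by
  unfold pyLjust
  congr 2
  omega

theorem pyRange_map_two {α β γ : Type} (xs : List α) (ys : List β) (f : α → β → γ)
    (da : α) (db : β) (n : Nat) (hx : xs.length = n) (hy : ys.length = n) :
    (PySem.List.pyRange 0 (n : Int) 1).map
        (fun i => f (PySem.List.pyGetD xs i da) (PySem.List.pyGetD ys i db)) =
      (xs.zip ys).map (fun p => f p.1 p.2) := by
  rw [PySem.List.pyRange_zero_natCast, List.map_map]
  apply List.ext_getElem
  · simp [hx, hy]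
  · intro i h1 h2
    simp only [List.getElem_map, List.getElem_range, List.getElem_zip, Function.comp]
    rw [PySem.List.pyGetD_natCast, PySem.List.pyGetD_natCast]
    simp only [List.length_map, List.length_range] at h1
    rw [List.getD_eq_getElem _ _ (by omega), List.getD_eq_getElem _ _ (by omega)]

theorem seg_sum_lt (lcs : List Char) (hl : 1 ≤ lcs.length) :
    ∀ (ts : List (List Char)), (∀ s ∈ ts, PySem.Chars.isIn lcs s = true) →
      (((ts.map (fun t => (t, PySem.Chars.find t lcs))).map
          (fun p => PySem.Chars.slice p.1 none (some p.2))).map List.length).sum +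
      (((ts.map (fun t => (t, PySem.Chars.find t lcs))).map
          (fun p => PySem.Chars.slice p.1 (some (p.2 + (lcs.length : Int))) none)).map List.length).sum +
      ts.length ≤ (ts.map List.length).sum := by
  intro ts
  induction ts with
  | nil => intro _; simp
  | cons t rest ih =>
    intro hall
    have hin := hall t (List.mem_cons_self)
    have hrest := fun s hs => hall s (List.mem_cons_of_mem _ hs)
    have hf : 0 ≤ PySem.Chars.find t lcs :=
      (PySem.Chars.find_nonneg_iff _ _).mpr ((PySem.Chars.isIn_iff_infix _ _).mp hin)
    have hlen : (PySem.Chars.find t lcs).toNat + lcs.length ≤ t.length := by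
      have hpre := (PySem.Chars.find_spec hf).1.length_le
      simp only [List.length_drop] at hpre
      omega
    have e1 : PySem.Chars.slice t none (some (PySem.Chars.find t lcs)) =
        t.take (PySem.Chars.find t lcs).toNat := by
      rw [PySem.Chars.slice_eq_listSlice, PySem.List.slice_to _ hf]
    have e2 : PySem.Chars.slice t (some (PySem.Chars.find t lcs + (lcs.length : Int))) none =
        t.drop (PySem.Chars.find t lcs + (lcs.length : Int)).toNat := by
      rw [PySem.Chars.slice_eq_listSlice, PySem.List.slice_from _ (by omega)]
    simp only [List.map_cons, List.sum_cons, List.length_cons, e1, e2]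
    have hih := ih hrest
    simp only [List.length_take, List.length_drop]
    omega

theorem bAlign_length : ∀ (fuel : Nat) (texts : List (List Char)) (m : Int), 1 ≤ m →
    (texts.map List.length).sum < fuel → (bAlign fuel texts m).length = texts.length := by
  intro fuel
  induction fuel with
  | zero => intro texts m _ hs; omega
  | succ fuel ih =>
    intro texts m hm hs
    rw [bAlign]
    by_cases hle : texts.length ≤ 1
    · rw [if_pos hle]
    · rw [if_neg hle]
      by_cases hemp : (texts.any fun t => t.isEmpty) = true
      · rw [if_pos hemp]; simp
      · rw [if_neg hemp]
        cases hfind : bFind texts m with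
        | none => simp
        | some r =>
          obtain ⟨lcs, idxs⟩ := r
          simp only []
          obtain ⟨hl1, hidxs, hcomm⟩ := bFind_spec hm hfind
          have hzip : texts.zip idxs = texts.map (fun t => (t, PySem.Chars.find t lcs)) := by
            rw [hidxs, ← List.map_prod_left_eq_zip]
          have hsum := seg_sum_lt lcs hl1 texts hcomm
          rw [← hzip] at hsum
          have hsl : (((texts.zip idxs).map
              (fun p => PySem.Chars.slice p.1 none (some p.2))).map List.length).sum < fuel := by
            omega
          have hsr : (((texts.zip idxs).map
              (fun p => PySem.Chars.slice p.1 (some (p.2 + (lcs.length : Int))) none)).map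
                List.length).sum < fuel := by
            omega
          have hlenidx : idxs.length = texts.length := by rw [hidxs]; simp
          have hlL : ((texts.zip idxs).map
              (fun p => PySem.Chars.slice p.1 none (some p.2))).length = texts.length := by
            simp [List.length_zip, hlenidx]
          have hlR : ((texts.zip idxs).map
              (fun p => PySem.Chars.slice p.1 (some (p.2 + (lcs.length : Int))) none)).length =
              texts.length := by
            simp [List.length_zip, hlenidx]
          have lenAL : (if ((texts.zip idxs).map
                (fun p => PySem.Chars.slice p.1 none (some p.2))).any (fun s => !s.isEmpty) = true
              then bAlign fuel ((texts.zip idxs).map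
                (fun p => PySem.Chars.slice p.1 none (some p.2))) m
              else List.replicate texts.length []).length = texts.length := by
            split
            · rw [ih _ m hm hsl, hlL]
            · simp
          have lenAR : (if ((texts.zip idxs).map
                (fun p => PySem.Chars.slice p.1 (some (p.2 + (lcs.length : Int))) none)).any
                  (fun s => !s.isEmpty) = true
              then bAlign fuel ((texts.zip idxs).map
                (fun p => PySem.Chars.slice p.1 (some (p.2 + (lcs.length : Int))) none)) m
              else List.replicate texts.length []).length = texts.length := by
            split
            · rw [ih _ m hm hsr, hlR]
            · simp
          simp only [List.length_map, List.length_zip, lenAL, lenAR]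
          omega

theorem align_eq : ∀ (fuel : Nat) (texts : List (List Char)) (m : Int), 1 ≤ m →
    (texts.map List.length).sum < fuel → aAlign fuel texts m = bAlign fuel texts m := by
  intro fuel
  induction fuel with
  | zero => intro texts m _ hs; omega
  | succ fuel ih =>
    intro texts m hm hs
    rw [aAlign, bAlign]
    by_cases hle : texts.length ≤ 1
    · rw [if_pos hle, if_pos hle]
    · rw [if_neg hle, if_neg hle]
      have hne : texts ≠ [] := by
        intro h; subst h; simp at hle
      by_cases hemp : (texts.any fun t => t.isEmpty) = true
      · rw [if_pos hemp, if_pos hemp, widths_eq texts hne]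
        apply List.map_congr_left
        intro t _
        exact ljust_eq t _ (width_nonneg texts)
      · rw [if_neg hemp, if_neg hemp, find_eq texts m hm]
        cases hfind : bFind texts m with
        | none =>
          simp only []
          apply List.map_congr_left
          intro t _
          exact ljust_eq t _ (width_nonneg texts)
        | some r =>
          obtain ⟨lcs, idxs⟩ := r
          simp only []
          obtain ⟨hl1, hidxs, hcomm⟩ := bFind_spec hm hfind
          have hlenidx : idxs.length = texts.length := by rw [hidxs]; simp
          have hL := pyRange_map_two texts idxs
            (fun a b => PySem.Chars.slice a none (some b)) [] 0 texts.length rfl hlenidx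
          have hR := pyRange_map_two texts idxs
            (fun a b => PySem.Chars.slice a (some (b + (lcs.length : Int))) none) [] 0
            texts.length rfl hlenidx
          rw [hL, hR]
          have hzip : texts.zip idxs = texts.map (fun t => (t, PySem.Chars.find t lcs)) := by
            rw [hidxs, ← List.map_prod_left_eq_zip]
          have hsum := seg_sum_lt lcs hl1 texts hcomm
          rw [← hzip] at hsum
          have hsl : (((texts.zip idxs).map
              (fun p => PySem.Chars.slice p.1 none (some p.2))).map List.length).sum < fuel := by
            omega
          have hsr : (((texts.zip idxs).map
              (fun p => PySem.Chars.slice p.1 (some (p.2 + (lcs.length : Int))) none)).map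
                List.length).sum < fuel := by
            omega
          rw [ih _ m hm hsl, ih _ m hm hsr]
          have hlL : ((texts.zip idxs).map
              (fun p => PySem.Chars.slice p.1 none (some p.2))).length = texts.length := by
            simp [List.length_zip, hlenidx]
          have hlR : ((texts.zip idxs).map
              (fun p => PySem.Chars.slice p.1 (some (p.2 + (lcs.length : Int))) none)).length =
              texts.length := by
            simp [List.length_zip, hlenidx]
          have lenAL : (if ((texts.zip idxs).map
                (fun p => PySem.Chars.slice p.1 none (some p.2))).any (fun s => !s.isEmpty) = true
              then bAlign fuel ((texts.zip idxs).map
                (fun p => PySem.Chars.slice p.1 none (some p.2))) m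
              else List.replicate texts.length []).length = texts.length := by
            split
            · rw [bAlign_length fuel _ m hm hsl, hlL]
            · simp
          have lenAR : (if ((texts.zip idxs).map
                (fun p => PySem.Chars.slice p.1 (some (p.2 + (lcs.length : Int))) none)).any
                  (fun s => !s.isEmpty) = true
              then bAlign fuel ((texts.zip idxs).map
                (fun p => PySem.Chars.slice p.1 (some (p.2 + (lcs.length : Int))) none)) m
              else List.replicate texts.length []).length = texts.length := by
            split
            · rw [bAlign_length fuel _ m hm hsr, hlR]
            · simp
          exact pyRange_map_two _ _ (fun a b => a ++ lcs ++ b) [] [] texts.length lenAL lenAR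


theorem base_eq (fuel : Nat) (texts : List (List Char)) (m : Int)
    (h : texts.length ≤ 1 ∨ ∃ t ∈ texts, t = []) :
    aAlign (fuel + 1) texts m = bAlign (fuel + 1) texts m := by
  rw [aAlign, bAlign]
  by_cases hle : texts.length ≤ 1
  · rw [if_pos hle, if_pos hle]
  · rw [if_neg hle, if_neg hle]
    have hne : texts ≠ [] := by
      intro hh; subst hh; simp at hle
    rcases h with h | ⟨t, ht, hemp⟩
    · omega
    · have hany : (texts.any fun t => t.isEmpty) = true := by
        simp only [List.any_eq_true]
        exact ⟨t, ht, by simp [hemp]⟩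
      rw [if_pos hany, if_pos hany, widths_eq texts hne]
      apply List.map_congr_left
      intro u _
      exact ljust_eq u _ (width_nonneg texts)

-- ===== VERDICT (by name: the statement is the Claim_ definition above) =====
theorem align_texts_recursively_spec : Claim_equal_align_texts_recursively := by
  intro texts m _ hpre
  unfold Spec_align_texts_recursively align_texts_recursively align_texts_recursively_alt
  unfold Pre_align_texts_recursively at hpre
  refine hpre.elim (fun hm => ?_) (fun h2 => ?_)
  · exact congrArg _ (align_eq _ _ _ hm (Nat.lt_succ_self _))
  · refine h2.elim (fun h1 => ?_) (fun hbase => ?_)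
    · exact congrArg _ (base_eq _ _ _ (Or.inl (by simpa using h1)))
    · obtain ⟨t, ht, hemp⟩ := hbase
      exact congrArg _ (base_eq _ _ _
        (Or.inr ⟨t.toList, List.mem_map_of_mem ht, by simp [hemp]⟩))
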